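-- pv_equiv track=rewrite | github.com/milanbiranwar18/reinforcement | practice_problem/dice_game.py | dice_game
-- ===== SOURCE A (Python) =====
-- def dice_game(a_list):
--     a = 0
--     for i in range(len(a_list)):
--         for j in range(len(a_list[i])-1):
--             if a_list[i][j] == a_list[i][j+1]:
--                 return 0
--             a += a_list[i][j] + a_list[i][j+1]
--     return a
-- ===== SOURCE B (Python) =====
-- def dice_game(a_list):
--     if any(x == y for row in a_list for x, y in zip(row, row[1:])):
--         return 0
--     # each adjacent pair contributes x + y, so every element is counted once per
--     # neighbour: twice for interior elements, once for the two endpoints.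
--     return sum(2 * sum(row) - row[0] - row[-1] for row in a_list if row)
-- ===== Notes on version B (the rewrite author's own statement) =====
-- stated objective: alternative
-- what changed: B never builds or sums adjacent pairs: after a short-circuit equal-neighbour check it computes each row's contribution by the closed form 2*sum(row) - row[0] - row[-1] (every interior element sits in two adjacent pairs, the endpoints in one), replacing A's interleaved pair-by-pair accumulation with early return.
import Mathlib
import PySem

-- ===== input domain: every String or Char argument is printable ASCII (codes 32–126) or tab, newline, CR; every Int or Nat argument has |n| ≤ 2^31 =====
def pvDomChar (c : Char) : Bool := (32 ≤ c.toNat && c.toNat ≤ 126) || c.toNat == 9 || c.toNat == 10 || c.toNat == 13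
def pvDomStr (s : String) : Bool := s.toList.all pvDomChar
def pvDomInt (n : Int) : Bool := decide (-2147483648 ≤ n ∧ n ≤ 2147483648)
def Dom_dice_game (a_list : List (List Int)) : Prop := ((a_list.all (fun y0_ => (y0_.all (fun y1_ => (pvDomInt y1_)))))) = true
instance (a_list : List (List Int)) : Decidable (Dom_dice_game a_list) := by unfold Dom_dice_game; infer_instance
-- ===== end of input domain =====

-- B drops A's pair-by-pair accumulation: after a short-circuit equal-neighbour check it
-- computes each row's contribution by the closed form 2*sum(row) - row[0] - row[-1]
-- (objective: alternative — arithmetic identity instead of summing adjacent pairs).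

-- ===== PORT A =====
-- inner loop over j: walks the row's adjacent pairs; `none` = early `return 0` fired
def dgInner : List Int → Int → Option Int
  | x :: y :: rest, a =>
      if x == y then none
      else dgInner (y :: rest) (a + (x + y))
  | _, a => some a

-- outer loop over rows, threading the accumulator `a`
def dgOuter : List (List Int) → Int → Int
  | [], a => a
  | row :: rows, a =>
      match dgInner row a with
      | none => 0
      | some a' => dgOuter rows a'

def dice_game (a_list : List (List Int)) : Int := dgOuter a_list 0

-- ===== PORT B =====
-- `any(x == y for x, y in zip(row, row[1:]))` for one row
def hasEqPair : List Int → Bool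
  | x :: y :: rest => x == y || hasEqPair (y :: rest)
  | _ => false

-- `2 * sum(row) - row[0] - row[-1]` (only applied to nonempty rows, as in Source B's `if row`)
def rowClosed (row : List Int) : Int :=
  2 * row.sum - PySem.List.pyGetD row 0 0 - PySem.List.pyGetD row (-1) 0

def dice_game_alt (a_list : List (List Int)) : Int :=
  if a_list.any hasEqPair then 0
  else ((a_list.filter (fun r => !r.isEmpty)).map rowClosed).sum

-- ===== PRECONDITION & SPEC =====
def Spec_dice_game (a_list : List (List Int)) (out : Int) : Prop := out = dice_game_alt a_list
instance (a_list : List (List Int)) (out : Int) : Decidable (Spec_dice_game a_list out) := by unfold Spec_dice_game; infer_instance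

-- ===== CLAIM (what is proved, stated in full; the proofs are below) =====
def Claim_equal_dice_game : Prop := ∀ (a_list : List (List Int)), Dom_dice_game a_list → Spec_dice_game a_list (dice_game a_list)

-- ===== LEMMAS AND PROOFS =====
-- sum of adjacent pairs of one row, the quantity A's inner loop adds
def pairSum : List Int → Int
  | x :: y :: rest => (x + y) + pairSum (y :: rest)
  | _ => 0

theorem dgInner_eq (row : List Int) : ∀ a : Int,
    dgInner row a = if hasEqPair row then none else some (a + pairSum row) := by
  induction row with
  | nil => intro a; simp [dgInner, hasEqPair, pairSum]
  | cons x rest ih =>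
    intro a
    cases rest with
    | nil => simp [dgInner, hasEqPair, pairSum]
    | cons y rest' =>
      simp only [dgInner, hasEqPair, pairSum]
      by_cases h : x = y
      · simp [h]
      · rw [ih]
        by_cases h2 : hasEqPair (y :: rest') = true
        · simp [h, h2]
        · simp [h, h2]; ring

theorem pairSum_closed (row : List Int) (h : row ≠ []) : pairSum row = rowClosed row := by
  induction row with
  | nil => exact absurd rfl h
  | cons x rest ih =>
    cases rest with
    | nil => simp [pairSum, rowClosed, PySem.List.pyGetD, PySem.List.pyGet?, PySem.List.pyIdx?]; ring
    | cons y rest' =>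
      have hne : (y :: rest') ≠ [] := by simp
      have e : PySem.List.pyGetD (x :: y :: rest') (-1) 0 = PySem.List.pyGetD (y :: rest') (-1) 0 := by
        rw [PySem.List.pyGetD_neg_one _ _ hne,
          PySem.List.pyGetD_neg_one _ _ (by simp : (x :: y :: rest') ≠ []), List.getLast_cons]
      simp only [pairSum, ih hne, rowClosed, PySem.List.pyGetD_zero_cons, e, List.sum_cons]
      ring

theorem map_pairSum_sum (rows : List (List Int)) :
    (rows.map pairSum).sum = ((rows.filter (fun r => !r.isEmpty)).map rowClosed).sum := by
  induction rows with
  | nil => rfl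
  | cons row rows' ih =>
    cases row with
    | nil => simpa [pairSum, List.filter] using ih
    | cons x rest =>
      simp only [List.map_cons, List.sum_cons, List.filter, List.isEmpty_cons,
        Bool.not_false, ih, pairSum_closed (x :: rest) (by simp)]

theorem dgOuter_eq (rows : List (List Int)) : ∀ a : Int,
    dgOuter rows a = if rows.any hasEqPair then 0 else a + (rows.map pairSum).sum := by
  induction rows with
  | nil => intro a; simp [dgOuter]
  | cons row rows' ih =>
    intro a
    by_cases h : hasEqPair row
    · simp [dgOuter, dgInner_eq, h]
    · simp only [dgOuter, dgInner_eq, h, List.any_cons, List.map_cons, List.sum_cons,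
        Bool.false_or, if_false, Bool.false_eq_true]
      rw [ih]
      by_cases h2 : rows'.any hasEqPair = true
      · simp [h2]
      · simp [h2]; ring

-- ===== VERDICT (by name: the statement is the Claim_ definition above) =====
theorem dice_game_spec : Claim_equal_dice_game := by
  intro a_list _
  unfold Spec_dice_game dice_game dice_game_alt
  rw [dgOuter_eq, map_pairSum_sum]
  split <;> simp
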